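-- pv_equiv track=rewrite | github.com/UWPCE-PythonCert-ClassRepos/Self_Paced-Online | students/alheadstrong/lesson_3/strformat_lab.py | taskthree
-- ===== SOURCE A (Python) =====
-- def taskthree(t):
--     '''Return variable length string listing elements of tuble t.'''
--     if len(t) == 0:
--         return "there are no numbers"
--     elif len(t) == 1:
--         return f'the number is {t[0]}'
--     else:
--         form_string = ["the {} numbers are: {}"]
--         for i in range(len(t)-1):
--             form_string.append('{}')
--         form_string = ", ".join(form_string)
--         return form_string.format(len(t),*t)
-- ===== SOURCE B (Python) =====
-- def taskthree(t):
--     '''Return variable length string listing elements of tuple t.'''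
--     if len(t) == 0:
--         return "there are no numbers"
--     elif len(t) == 1:
--         return f'the number is {t[0]}'
--     else:
--         return 'the {} numbers are: {}'.format(len(t), ', '.join(str(x) for x in t))
-- ===== Notes on version B (the rewrite author's own statement) =====
-- stated objective: simpler
-- what changed: Instead of looping over a counter to build a variable-length format template ('the {} numbers are: {}' plus n-1 extra '{}' joined by ', ') and formatting it with *t, B stringifies the element values directly and joins them once into a single fixed two-slot template.
import Mathlib
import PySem

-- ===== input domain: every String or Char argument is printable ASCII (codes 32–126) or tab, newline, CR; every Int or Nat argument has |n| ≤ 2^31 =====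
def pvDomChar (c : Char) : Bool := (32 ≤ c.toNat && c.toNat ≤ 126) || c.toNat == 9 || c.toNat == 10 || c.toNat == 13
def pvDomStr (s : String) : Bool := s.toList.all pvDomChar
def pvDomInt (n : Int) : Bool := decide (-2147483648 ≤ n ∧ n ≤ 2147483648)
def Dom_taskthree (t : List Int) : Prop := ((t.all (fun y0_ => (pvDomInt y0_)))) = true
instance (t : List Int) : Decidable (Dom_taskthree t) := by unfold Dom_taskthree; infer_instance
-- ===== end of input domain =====

-- B builds the joined value string directly with one fixed two-slot template instead of
-- looping to build a variable-length '{}' template; objective: simpler decomposition.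

-- ===== PORT A =====
-- str.format with positional '{}' slots, exact for templates whose only braces are the
-- '{}' pairs present in A's generated template and with one argument per slot (A's case).
def pyFormat : List Char → List Int → List Char
  | '{' :: '}' :: rest, a :: args => PySem.Int.toChars a ++ pyFormat rest args
  | c :: rest, args => c :: pyFormat rest args
  | [], _ => []

def taskthree (t : List Int) : String :=
  if t.length == 0 then "there are no numbers"
  else if t.length == 1 then
    String.ofList ("the number is ".toList ++ PySem.Int.toChars (PySem.List.pyGetD t 0 0))
  else
    let form_string :=
      (PySem.List.pyRange 0 ((t.length : Int) - 1) 1).foldl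
        (fun acc _ => acc ++ ["{}".toList]) ["the {} numbers are: {}".toList]
    let fs := PySem.Chars.join (", ".toList) form_string
    String.ofList (pyFormat fs ((t.length : Int) :: t))

-- ===== PORT B =====
def taskthree_alt (t : List Int) : String :=
  if t.length == 0 then "there are no numbers"
  else if t.length == 1 then
    String.ofList ("the number is ".toList ++ PySem.Int.toChars (PySem.List.pyGetD t 0 0))
  else
    String.ofList ("the ".toList ++ PySem.Int.toChars (t.length : Int)
      ++ " numbers are: ".toList
      ++ PySem.Chars.join (", ".toList) (t.map PySem.Int.toChars))

-- ===== PRECONDITION & SPEC =====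
def Spec_taskthree (t : List Int) (out : String) : Prop := out = taskthree_alt t
instance (t : List Int) (out : String) : Decidable (Spec_taskthree t out) := by unfold Spec_taskthree; infer_instance

-- ===== CLAIM (what is proved, stated in full; the proofs are below) =====
def Claim_equal_taskthree : Prop := ∀ (t : List Int), Dom_taskthree t → Spec_taskthree t (taskthree t)

-- ===== LEMMAS AND PROOFS =====

-- a '{}' slot consumes the next argument
lemma pyFormat_slot (r : List Char) (a : Int) (as : List Int) :
    pyFormat ('{' :: '}' :: r) (a :: as) = PySem.Int.toChars a ++ pyFormat r as := rfl

-- a literal (non-'{') character passes through the formatter unchanged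
lemma pyFormat_lit (c : Char) (r : List Char) (as : List Int) (hc : c ≠ '{') :
    pyFormat (c :: r) as = c :: pyFormat r as := by
  rw [pyFormat.eq_def]
  split <;> simp_all

-- the joined template: head string followed by k copies of ", {}"
lemma join_head_reps (k : Nat) (h : List Char) :
    PySem.Chars.join [',', ' '] (h :: List.replicate k ['{', '}'])
      = h ++ (List.replicate k [',', ' ', '{', '}']).flatten := by
  induction k generalizing h with
  | zero => simp [PySem.Chars.join_singleton]
  | succ n ih =>
      rw [List.replicate_succ, PySem.Chars.join_cons_cons, ih]
      simp [List.replicate_succ]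

-- formatting the chain of '{}' slots with one value per slot yields the joined values
lemma pyFormat_chain (xs : List Int) (x : Int) :
    pyFormat ('{' :: '}' :: (List.replicate xs.length [',', ' ', '{', '}']).flatten) (x :: xs)
      = PySem.Chars.join [',', ' '] ((x :: xs).map PySem.Int.toChars) := by
  induction xs generalizing x with
  | nil => simp [pyFormat, PySem.Chars.join_singleton]
  | cons y ys ih =>
      simp only [List.length_cons, List.replicate_succ, List.flatten_cons,
        List.cons_append, List.nil_append, pyFormat, List.map_cons]
      rw [pyFormat_lit _ _ _ (by decide), pyFormat_lit _ _ _ (by decide),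
        ih y, PySem.Chars.join_cons_cons]
      simp

-- ===== VERDICT (by name: the statement is the Claim_ definition above) =====
theorem taskthree_spec : Claim_equal_taskthree := by
  intro t _
  unfold Spec_taskthree taskthree taskthree_alt
  match t with
  | [] => rfl
  | [x] => rfl
  | a :: b :: rest =>
      simp only [List.length_cons]
      have h0 : (rest.length + 1 + 1 == 0) = false := by simp
      have h1 : (rest.length + 1 + 1 == 1) = false := by simp
      rw [h0, h1]
      simp only [Bool.false_eq_true, if_false]
      have hlen : ((rest.length + 1 + 1 : Nat) : Int) - 1 = ((rest.length + 1 : Nat) : Int) := by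
        push_cast; ring
      rw [PySem.List.foldl_append_singleton_eq_map (fun _ => "{}".toList), hlen,
        PySem.List.pyRange_zero_nat]
      have hmap : (List.map (fun _ => "{}".toList)
            (List.map (fun k : Nat => (k : Int)) (List.range (rest.length + 1))))
          = List.replicate (rest.length + 1) ['{', '}'] := by
        simp [List.map_map, List.eq_replicate_iff]
      have hsep : ", ".toList = [',', ' '] := by decide
      have htmpl : "the {} numbers are: {}".toList
          = ['t','h','e',' ','{','}',' ','n','u','m','b','e','r','s',' ','a','r','e',':',' ','{','}'] := by decide
      rw [hmap, hsep, List.singleton_append, htmpl, join_head_reps]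
      simp only [List.cons_append, List.nil_append]
      rw [pyFormat_lit _ _ _ (by decide), pyFormat_lit _ _ _ (by decide),
        pyFormat_lit _ _ _ (by decide), pyFormat_lit _ _ _ (by decide)]
      rw [pyFormat_slot]
      rw [pyFormat_lit _ _ _ (by decide), pyFormat_lit _ _ _ (by decide),
        pyFormat_lit _ _ _ (by decide), pyFormat_lit _ _ _ (by decide),
        pyFormat_lit _ _ _ (by decide), pyFormat_lit _ _ _ (by decide),
        pyFormat_lit _ _ _ (by decide), pyFormat_lit _ _ _ (by decide),
        pyFormat_lit _ _ _ (by decide), pyFormat_lit _ _ _ (by decide),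
        pyFormat_lit _ _ _ (by decide), pyFormat_lit _ _ _ (by decide),
        pyFormat_lit _ _ _ (by decide), pyFormat_lit _ _ _ (by decide)]
      have hchain := pyFormat_chain (b :: rest) a
      simp only [List.length_cons] at hchain
      rw [hchain]
      have hthe : "the ".toList = ['t','h','e',' '] := by decide
      have hnum : " numbers are: ".toList
          = [' ','n','u','m','b','e','r','s',' ','a','r','e',':',' '] := by decide
      rw [hthe, hnum]
      simp
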